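-- pv_equiv track=rewrite | github.com/arya1106/coding-assignment-dcsl | coaching_challenge.py | calcHetero
-- ===== SOURCE A (Python) =====
-- def calcHetero(teamCombinations):
--     heterogeneityDict = {}
--     for index, team in enumerate(teamCombinations):
--         heterogeneity = max(team) - min(team)
--         if heterogeneity in heterogeneityDict.keys():
--             heterogeneityDict[heterogeneity].append(team)
--         else:
--             heterogeneityDict[heterogeneity] = [team]
--     return heterogeneityDict
-- ===== SOURCE B (Python) =====
-- def calcHetero(teamCombinations):
--     def het(team):
--         return max(team) - min(team)
--     keys = []
--     for team in teamCombinations: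
--         h = het(team)
--         if h not in keys:
--             keys.append(h)
--     result = {}
--     for k in keys:
--         result[k] = [t for t in teamCombinations if het(t) == k]
--     return result
-- ===== Notes on version B (the rewrite author's own statement) =====
-- stated objective: alternative
-- what changed: Replaces the single-pass dict accumulation (append-or-create per team) with a two-phase plan: first collect the distinct heterogeneity keys in order of first appearance, then build each group by filtering the whole input per key.
import Mathlib
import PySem

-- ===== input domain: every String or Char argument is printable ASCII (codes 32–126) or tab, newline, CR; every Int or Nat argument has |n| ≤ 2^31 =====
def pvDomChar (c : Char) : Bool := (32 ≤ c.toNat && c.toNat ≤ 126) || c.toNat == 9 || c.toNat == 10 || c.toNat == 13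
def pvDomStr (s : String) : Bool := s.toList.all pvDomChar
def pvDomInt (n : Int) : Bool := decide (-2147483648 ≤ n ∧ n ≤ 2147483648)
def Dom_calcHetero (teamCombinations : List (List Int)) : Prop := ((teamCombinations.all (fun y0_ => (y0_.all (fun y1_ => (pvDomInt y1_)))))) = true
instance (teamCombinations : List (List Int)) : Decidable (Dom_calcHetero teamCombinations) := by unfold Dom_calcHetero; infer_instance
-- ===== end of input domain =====

-- B replaces A's single-pass dict accumulation by first collecting the distinct keys
-- in first-appearance order and then filtering the input once per key (objective: alternative).


-- max(team) - min(team); Pre_ guarantees team ≠ [], so the .getD defaults are never used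
def pvHet (team : List Int) : Int := ((PySem.List.max? team (fun x => x)).getD 0) - ((PySem.List.min? team (fun x => x)).getD 0)

-- ===== PORT A =====
def calcHetero (teamCombinations : List (List Int)) : List (Int × List (List Int)) :=
  ((PySem.List.enumerate teamCombinations).foldl
    (fun (d : PySem.Dict Int (List (List Int))) p =>
      let heterogeneity := pvHet p.2
      if d.contains heterogeneity then
        d.modify heterogeneity [] (fun l => l ++ [p.2])
      else
        d.insert heterogeneity [p.2])
    PySem.Dict.empty).items

-- ===== PORT B =====
def calcHetero_alt (teamCombinations : List (List Int)) : List (Int × List (List Int)) :=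
  let keys : PySem.Set Int :=
    teamCombinations.foldl (fun ks team => PySem.Set.add ks (pvHet team)) PySem.Set.empty
  (keys.foldl
    (fun (d : PySem.Dict Int (List (List Int))) k =>
      d.insert k (teamCombinations.filter (fun t => pvHet t == k)))
    PySem.Dict.empty).items

-- ===== PRECONDITION & SPEC =====
-- Pre_ excludes inputs containing an empty team, on which Python's max([]) raises ValueError (in both A and B)
def Pre_calcHetero (teamCombinations : List (List Int)) : Prop :=
  ∀ team ∈ teamCombinations, team ≠ []
instance (teamCombinations : List (List Int)) : Decidable (Pre_calcHetero teamCombinations) := by unfold Pre_calcHetero; infer_instance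

def pvWitness_calcHetero : List (List Int) := [[1, 3], [2, 2], [5, 1], [0, 2]]

def Spec_calcHetero (teamCombinations : List (List Int)) (out : List (Int × List (List Int))) : Prop := out = calcHetero_alt teamCombinations
instance (teamCombinations : List (List Int)) (out : List (Int × List (List Int))) : Decidable (Spec_calcHetero teamCombinations out) := by unfold Spec_calcHetero; infer_instance

-- ===== CLAIM (what is proved, stated in full; the proofs are below) =====
def Claim_equal_calcHetero : Prop := ∀ (teamCombinations : List (List Int)), Dom_calcHetero teamCombinations → Pre_calcHetero teamCombinations → Spec_calcHetero teamCombinations (calcHetero teamCombinations)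

-- ===== LEMMAS AND PROOFS =====

-- the common normal form both ports reduce to
def pvNorm (ts : List (List Int)) : List (Int × List (List Int)) :=
  (PySem.Set.ofList (ts.map pvHet)).map (fun k => (k, ts.filter (fun t => pvHet t == k)))

-- A's loop body (append-or-create) is exactly Dict.modify with default []
lemma pvStepA_eq_modify (d : PySem.Dict Int (List (List Int))) (h : Int) (t : List Int) :
    (if d.contains h then d.modify h [] (fun l => l ++ [t]) else d.insert h [t])
      = d.modify h [] (fun l => l ++ [t]) := by
  by_cases hc : d.contains h = true
  · simp [hc]
  · simp only [Bool.not_eq_true] at hc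
    simp [hc, PySem.Dict.modify, PySem.Dict.getD_of_not_contains d ([] : List (List Int)) hc]

-- A's fold over enumerate (index unused) is the fold over key/team pairs
lemma pvFoldA_pairs (ts : List (List Int)) (s : Int) (d : PySem.Dict Int (List (List Int))) :
    (PySem.List.enumerate ts s).foldl
        (fun d p => d.modify (pvHet p.2) [] (fun l => l ++ [p.2])) d
      = (ts.map (fun t => (pvHet t, t))).foldl
          (fun d q => d.modify q.1 [] (fun l => l ++ [q.2])) d := by
  induction ts generalizing s d with
  | nil => rfl
  | cons t ts ih => simp [PySem.List.enumerate_cons, ih]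

lemma calcHetero_eq_norm (ts : List (List Int)) : calcHetero ts = pvNorm ts := by
  show ((PySem.List.enumerate ts 0).foldl
      (fun (d : PySem.Dict Int (List (List Int))) p =>
        if d.contains (pvHet p.2) then d.modify (pvHet p.2) [] (fun l => l ++ [p.2])
        else d.insert (pvHet p.2) [p.2]) PySem.Dict.empty).items = pvNorm ts
  simp only [pvStepA_eq_modify]
  rw [pvFoldA_pairs]
  have hnd : ((ts.map (fun t => (pvHet t, t))).foldl
      (fun (d : PySem.Dict Int (List (List Int))) q =>
        d.modify q.1 [] (fun l => l ++ [q.2]))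
      PySem.Dict.empty).keys.Nodup :=
    PySem.Dict.nodup_keys_foldl_modify_key
      (ts.map (fun t => (pvHet t, t))) (fun q => q.1) ([] : List (List Int))
      (fun _ q => (fun l => l ++ [q.2])) PySem.Dict.empty
      (by simp [PySem.Dict.keys_empty])
  rw [PySem.Dict.items_eq_map_keys _ hnd ([] : List (List Int))]
  have hkeys : ((ts.map (fun t => (pvHet t, t))).foldl
      (fun (d : PySem.Dict Int (List (List Int))) q =>
        d.modify q.1 [] (fun l => l ++ [q.2]))
      PySem.Dict.empty).keys = PySem.Set.ofList (ts.map pvHet) := by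
    have h := PySem.Dict.keys_foldl_modify_key
      (ts.map (fun t => (pvHet t, t))) (fun q => q.1) ([] : List (List Int))
      (fun _ q => (fun l => l ++ [q.2])) PySem.Dict.empty
    rw [h]
    simp [PySem.Dict.keys_empty, PySem.Set.update_nil_left,
      List.map_map, Function.comp_def]
  rw [hkeys]
  unfold pvNorm
  apply List.map_congr_left
  intro k _
  congr 1
  rw [PySem.Dict.getD_foldl_modify_append]
  simp [PySem.Dict.getD_empty, List.filter_map, Function.comp_def]

lemma calcHetero_alt_eq_norm (ts : List (List Int)) : calcHetero_alt ts = pvNorm ts := by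
  unfold calcHetero_alt
  have hk : ts.foldl (fun ks team => PySem.Set.add ks (pvHet team)) PySem.Set.empty
      = PySem.Set.ofList (ts.map pvHet) := by
    rw [← PySem.Set.update_map_eq_foldl_add]
    simp [PySem.Set.empty, PySem.Set.update_nil_left]
  simp only [hk]
  have h := PySem.Dict.items_foldl_insert_fresh
    (PySem.Set.ofList (ts.map pvHet)) (fun a => a)
    (fun k => ts.filter (fun t => pvHet t == k))
    (PySem.Dict.empty : PySem.Dict Int (List (List Int)))
    (by intro a _; exact PySem.Dict.contains_empty a)
    (by simp [PySem.Set.nodup_ofList])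
  simp only [] at h
  rw [h]
  simp [pvNorm, PySem.Dict.empty]

-- ===== VERDICT (by name: the statement is the Claim_ definition above) =====
theorem calcHetero_spec : Claim_equal_calcHetero := by
  intro ts _ _
  unfold Spec_calcHetero
  rw [calcHetero_eq_norm, calcHetero_alt_eq_norm]
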